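-- pv_equiv track=rewrite | github.com/shaurya27/NER-pytorch | src/prepare_dataset.py | read_corpus
-- ===== SOURCE A (Python) =====
-- def read_corpus(lines):
--     """
--     convert corpus into features and labels
--     """
--     features = list()
--     labels = list()
--     tmp_fl = list()
--     tmp_ll = list()
--     for line in lines:
--         if not (line.isspace() or (len(line) > 10 and line[0:10] == '-DOCSTART-')):
--             line  = line.lower()
--             line = line.rstrip('\n').split()
--             tmp_fl.append(line[0])
--             tmp_ll.append(line[-1])
--         elif len(tmp_fl) > 0:
--             features.append(tmp_fl)
--             labels.append(tmp_ll)
--             tmp_fl = list()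
--             tmp_ll = list()
--     if len(tmp_fl) > 0:
--         features.append(tmp_fl)
--         labels.append(tmp_ll)
--
--     return features, labels
-- ===== SOURCE B (Python) =====
-- def read_corpus(lines):
--     """
--     convert corpus into features and labels
--     """
--     def is_sep(line):
--         return line.isspace() or (len(line) > 10 and line[0:10] == '-DOCSTART-')
--     features, labels = [], []
--     n, i = len(lines), 0
--     while i < n:
--         if is_sep(lines[i]):
--             i += 1
--             continue
--         j = i
--         while j < n and not is_sep(lines[j]):
--             j += 1
--         toks = [ln.lower().rstrip('\n').split() for ln in lines[i:j]]
--         features.append([t[0] for t in toks])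
--         labels.append([t[-1] for t in toks])
--         i = j
--     return features, labels
-- ===== Notes on version B (the rewrite author's own statement) =====
-- stated objective: alternative
-- what changed: B replaces A's per-line state machine (temporary token/label buffers flushed on separator lines and at the end) with run-based grouping: an outer scan finds each maximal run of non-separator lines and maps the whole run to one feature list and one label list at once.
-- outside the precondition, e.g. on read_corpus(['a B', '']): A raises IndexError, B raises IndexError
import Mathlib
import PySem

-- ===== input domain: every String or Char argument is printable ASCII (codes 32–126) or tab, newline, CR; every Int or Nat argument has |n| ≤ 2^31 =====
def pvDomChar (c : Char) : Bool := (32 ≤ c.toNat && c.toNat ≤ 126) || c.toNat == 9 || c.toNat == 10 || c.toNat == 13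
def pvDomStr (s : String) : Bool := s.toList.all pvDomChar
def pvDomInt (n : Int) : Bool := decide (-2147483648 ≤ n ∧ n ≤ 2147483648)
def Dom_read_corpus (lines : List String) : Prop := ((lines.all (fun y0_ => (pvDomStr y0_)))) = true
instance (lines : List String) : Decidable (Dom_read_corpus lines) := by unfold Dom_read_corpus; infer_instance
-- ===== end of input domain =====

-- B re-decomposes A's per-line accumulator loop as run-based grouping (scan maximal
-- non-separator runs, map each run to one sentence); same cost, different structure.

-- shared helpers: the separator predicate and the tokenization both Pythons perform
def pvIsSep (line : String) : Bool :=
  PySem.Str.strIsspace line ||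
    (decide (PySem.Str.len line > 10) && PySem.Str.slice line (some 0) (some 10) == "-DOCSTART-")

-- exact port of Python's s.rstrip('\n'): drop trailing '\n' characters
def pvRstripNL (s : String) : String :=
  String.ofList ((s.toList.reverse.dropWhile (· == '\n')).reverse)

def pvTokens (line : String) : List String :=
  PySem.Str.split₀ (pvRstripNL (PySem.Str.lower line))

-- token[0] / token[-1]; Python raises IndexError on [] — Pre_ excludes that, so getD "" is unreachable
def pvFirst (toks : List String) : String := (PySem.List.pyGet? toks 0).getD ""
def pvLast (toks : List String) : String := (PySem.List.pyGet? toks (-1)).getD ""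

-- ===== PORT A =====
def pvStepA (st : (List (List String) × List (List String)) × (List String × List String))
    (line : String) : (List (List String) × List (List String)) × (List String × List String) :=
  let ((features, labels), (tmp_fl, tmp_ll)) := st
  if ¬ pvIsSep line then
    let toks := pvTokens line
    ((features, labels), (tmp_fl ++ [pvFirst toks], tmp_ll ++ [pvLast toks]))
  else if tmp_fl.length > 0 then
    ((features ++ [tmp_fl], labels ++ [tmp_ll]), ([], []))
  else
    ((features, labels), (tmp_fl, tmp_ll))

def read_corpus (lines : List String) : List (List String) × List (List String) :=
  let st := lines.foldl pvStepA (([], []), ([], []))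
  if st.2.1.length > 0 then (st.1.1 ++ [st.2.1], st.1.2 ++ [st.2.2]) else st.1

-- ===== PORT B =====
-- outer while-loop of Source B: skip separators, otherwise take the maximal run lines[i:j]
def pvGoB : List String → List (List String) × List (List String)
  | [] => ([], [])
  | l :: ls =>
    if pvIsSep l then pvGoB ls
    else
      let run := l :: ls.takeWhile (fun x => ¬ pvIsSep x)
      let rest := ls.dropWhile (fun x => ¬ pvIsSep x)
      let toks := run.map pvTokens
      let (fs, lbs) := pvGoB rest
      (toks.map pvFirst :: fs, toks.map pvLast :: lbs)
termination_by xs => xs.length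
decreasing_by
  · simp
  · have := List.length_dropWhile_le (p := fun x => ¬ pvIsSep x) (l := ls)
    simp at this ⊢; omega

def read_corpus_alt (lines : List String) : List (List String) × List (List String) :=
  pvGoB lines

-- ===== PRECONDITION & SPEC =====
-- Pre_ excludes inputs containing the empty line "": it is not isspace, so A (and B)
-- reach split() there, get no tokens, and raise IndexError on line[0].
def Pre_read_corpus (lines : List String) : Prop := "" ∉ lines
instance (lines : List String) : Decidable (Pre_read_corpus lines) := by
  unfold Pre_read_corpus; infer_instance

def pvWitness_read_corpus : List String := ["The B-NP", "sat O", " ", "dog B-NP"]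

def Spec_read_corpus (lines : List String) (out : List (List String) × List (List String)) : Prop :=
  out = read_corpus_alt lines
instance (lines : List String) (out : List (List String) × List (List String)) :
    Decidable (Spec_read_corpus lines out) := by unfold Spec_read_corpus; infer_instance

-- ===== CLAIM (what is proved, stated in full; the proofs are below) =====
def Claim_equal_read_corpus : Prop :=
  ∀ (lines : List String), Dom_read_corpus lines → Pre_read_corpus lines →
    Spec_read_corpus lines (read_corpus lines)

-- ===== LEMMAS AND PROOFS =====

-- proof-side helper: A's loop with an open partial sentence (tf, tl)
def pvGoP (tf tl : List String) : List String → List (List String) × List (List String)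
  | [] => if tf.length > 0 then ([tf], [tl]) else ([], [])
  | x :: xs =>
    if ¬ pvIsSep x then
      pvGoP (tf ++ [pvFirst (pvTokens x)]) (tl ++ [pvLast (pvTokens x)]) xs
    else if tf.length > 0 then
      (tf :: (pvGoP [] [] xs).1, tl :: (pvGoP [] [] xs).2)
    else pvGoP [] [] xs

def pvFinish (st : (List (List String) × List (List String)) × (List String × List String)) :
    List (List String) × List (List String) :=
  if st.2.1.length > 0 then (st.1.1 ++ [st.2.1], st.1.2 ++ [st.2.2]) else st.1

theorem pv_fold_goP (lines : List String) :
    ∀ (f l : List (List String)) (tf tl : List String), tf.length = tl.length →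
      pvFinish (lines.foldl pvStepA ((f, l), (tf, tl))) =
        (f ++ (pvGoP tf tl lines).1, l ++ (pvGoP tf tl lines).2) := by
  induction lines with
  | nil =>
    intro f l tf tl hlen
    by_cases h : tf.length > 0
    · simp [pvFinish, pvGoP, h]
    · have htf : tf = [] := by simpa using h
      have htl : tl = [] := List.eq_nil_of_length_eq_zero (by omega)
      simp [pvFinish, pvGoP, htf, htl]
  | cons x xs ih =>
    intro f l tf tl hlen
    by_cases hs : pvIsSep x
    · by_cases ht : tf.length > 0
      · simp only [List.foldl_cons, pvStepA, pvGoP, hs, ht, not_true, ite_false, ite_true]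
        rw [ih _ _ [] [] rfl]
        simp
      · have htf : tf = [] := by simpa using ht
        have htl : tl = [] := List.eq_nil_of_length_eq_zero (by omega)
        subst htf htl
        simp only [List.foldl_cons, pvStepA, pvGoP, hs, not_true, ite_false, List.length_nil,
          gt_iff_lt, lt_self_iff_false]
        rw [ih _ _ [] [] rfl]
    · rw [List.foldl_cons]
      have hstep : pvStepA ((f, l), (tf, tl)) x =
          ((f, l), (tf ++ [pvFirst (pvTokens x)], tl ++ [pvLast (pvTokens x)])) := by
        simp [pvStepA, hs]
      have hgo : pvGoP tf tl (x :: xs) =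
          pvGoP (tf ++ [pvFirst (pvTokens x)]) (tl ++ [pvLast (pvTokens x)]) xs := by
        simp [pvGoP, hs]
      rw [hstep, hgo, ih _ _ _ _ (by simp [hlen])]

-- pvGoP with the empty open run is B's grouping, and with a nonempty open run it closes
-- that run with the next maximal non-separator stretch; proved together by one induction
theorem pv_goP_goB (xs : List String) :
    pvGoP ([] : List String) [] xs = pvGoB xs ∧
    (∀ run : List String, run ≠ [] →
      pvGoP (run.map (fun s => pvFirst (pvTokens s))) (run.map (fun s => pvLast (pvTokens s))) xs =
        (((run ++ xs.takeWhile (fun x => ¬ pvIsSep x)).map (fun s => pvFirst (pvTokens s))) ::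
            (pvGoB (xs.dropWhile (fun x => ¬ pvIsSep x))).1,
         ((run ++ xs.takeWhile (fun x => ¬ pvIsSep x)).map (fun s => pvLast (pvTokens s))) ::
            (pvGoB (xs.dropWhile (fun x => ¬ pvIsSep x))).2)) := by
  induction xs with
  | nil =>
    constructor
    · simp [pvGoP, pvGoB]
    · intro run hr
      simp [pvGoP, pvGoB, List.length_pos_iff, hr]
  | cons x xs ih =>
    obtain ⟨ih1, ih2⟩ := ih
    by_cases hs : pvIsSep x
    · constructor
      · simp [pvGoP, pvGoB, hs, ih1]
      · intro run hr
        have hpos : (run.map (fun s => pvFirst (pvTokens s))).length > 0 := by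
          simp [List.length_pos_iff, hr]
        simp only [pvGoP, hs, not_true, ite_false, hpos, ite_true, ih1]
        simp [pvGoB, hs]
    · constructor
      · have hx := ih2 [x] (by simp)
        simp only [List.map_cons, List.map_nil] at hx
        simp only [pvGoP, hs, List.nil_append]
        rw [hx]
        simp [pvGoB, hs]
      · intro run hr
        simp only [pvGoP, hs]
        have h1 : run.map (fun s => pvFirst (pvTokens s)) ++ [pvFirst (pvTokens x)] =
            (run ++ [x]).map (fun s => pvFirst (pvTokens s)) := by simp
        have h2 : run.map (fun s => pvLast (pvTokens s)) ++ [pvLast (pvTokens x)] =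
            (run ++ [x]).map (fun s => pvLast (pvTokens s)) := by simp
        rw [h1, h2, ih2 (run ++ [x]) (by simp)]
        simp [hs]

-- ===== VERDICT (by name: the statement is the Claim_ definition above) =====
theorem read_corpus_spec : Claim_equal_read_corpus := by
  intro lines _ _
  unfold Spec_read_corpus read_corpus_alt
  show read_corpus lines = pvGoB lines
  have h : read_corpus lines = pvFinish (lines.foldl pvStepA (([], []), ([], []))) := rfl
  rw [h, pv_fold_goP lines [] [] [] [] rfl, (pv_goP_goB lines).1]
  simp
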